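-- pv_equiv track=rewrite | github.com/WahabAlam/ReportCopillot | utils/lab_data.py | _looks_like_markdown_table
-- ===== SOURCE A (Python) =====
-- def _looks_like_markdown_table(lines: list[str]) -> bool:
--     if len(lines) < 2:
--         return False
--     first = lines[0].strip()
--     second = lines[1].strip().replace(" ", "")
--     if not (first.startswith("|") and first.endswith("|")):
--         return False
--     if not (second.startswith("|") and second.endswith("|")):
--         return False
--     cells = [c for c in second.strip("|").split("|")]
--     if not cells:
--         return False
--     for c in cells:
--         if not c or set(c) - set("-:"):
--             return False
--     return True
-- ===== SOURCE B (Python) =====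
-- def _looks_like_markdown_table(lines: list[str]) -> bool:
--     if len(lines) < 2:
--         return False
--     first = lines[0].strip()
--     if not (first.startswith("|") and first.endswith("|")):
--         return False
--     s = lines[1].strip().replace(" ", "")
--     if not (s.startswith("|") and s.endswith("|")):
--         return False
--     # one pass over the separator line: trim the outer pipe runs with two
--     # cursors, then run a tiny state machine over the interior, which must
--     # be runs of '-'/':' separated by single pipes.
--     i = 0
--     while i < len(s) and s[i] == "|":
--         i += 1
--     j = len(s)
--     while j > i and s[j - 1] == "|":
--         j -= 1
--     if i == j:
--         return False  # the line is pipes only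
--     seen = False  # True while the current '-'/':' run is nonempty
--     for c in s[i:j]:
--         if c == "|":
--             if not seen:
--                 return False
--             seen = False
--         elif c in "-:":
--             seen = True
--         else:
--             return False
--     return seen
-- ===== Notes on version B (the rewrite author's own statement) =====
-- stated objective: alternative
-- what changed: Replaces A's strip('|') / split('|') / per-cell set-difference loop on the separator line by two cursor loops trimming the outer pipe runs and a single state-machine pass that checks the interior is runs of '-'/':' separated by single pipes.
import Mathlib
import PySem

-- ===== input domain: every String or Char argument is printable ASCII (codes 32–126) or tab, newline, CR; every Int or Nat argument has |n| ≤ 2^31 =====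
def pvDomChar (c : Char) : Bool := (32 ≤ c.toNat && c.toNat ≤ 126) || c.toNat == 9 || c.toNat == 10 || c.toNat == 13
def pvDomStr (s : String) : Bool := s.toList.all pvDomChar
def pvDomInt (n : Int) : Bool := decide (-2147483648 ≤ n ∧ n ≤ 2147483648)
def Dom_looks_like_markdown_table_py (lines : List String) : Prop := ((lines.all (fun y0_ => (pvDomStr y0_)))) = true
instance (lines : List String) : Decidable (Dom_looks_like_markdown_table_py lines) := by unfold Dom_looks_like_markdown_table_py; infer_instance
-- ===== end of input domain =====

-- B replaces A's strip('|')/split('|')/per-cell set test by a single left-to-right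
-- state-machine pass over the separator line (alternative decomposition, similar cost).

-- ===== PORT A =====
-- per-cell test of A's loop body: `not c or set(c) - set("-:")`
def pvCellBad (c : List Char) : Bool :=
  c.isEmpty || !(PySem.Set.diff (PySem.Set.ofList c) (PySem.Set.ofList ['-', ':'])).isEmpty

def looks_like_markdown_table_py (lines : List String) : Bool :=
  match lines with
  | l0 :: l1 :: _ =>
    let first := PySem.Str.strip l0
    let second := PySem.Str.replace (PySem.Str.strip l1) " " ""
    if !(PySem.Str.startswith first "|" && PySem.Str.endswith first "|") then false
    else if !(PySem.Str.startswith second "|" && PySem.Str.endswith second "|") then false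
    else
      let cells := PySem.Chars.splitOn (PySem.Chars.stripChars second.toList ['|']) ['|']
      if cells.isEmpty then false
      else cells.foldl (fun ok c => if pvCellBad c then false else ok) true
  | _ => false

-- ===== PORT B =====
-- B's cursor loop `while … and s[k] == '|'`: drop a leading run of pipes
def pvDropPipes : List Char → List Char
  | [] => []
  | c :: r => if c = '|' then pvDropPipes r else c :: r

-- B's one-pass state machine over the interior s[i:j]; `seen` = current '-'/':'-run nonempty
def pvScan : List Char → Bool → Bool
  | [], seen => seen
  | c :: r, seen =>
    if c = '|' then (if !seen then false else pvScan r false)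
    else if c = '-' || c = ':' then pvScan r true
    else false

def looks_like_markdown_table_py_alt (lines : List String) : Bool :=
  match lines with
  | [] => false
  | [_] => false
  | l0 :: l1 :: _ =>
    let first := PySem.Str.strip l0
    if !(PySem.Str.startswith first "|" && PySem.Str.endswith first "|") then false
    else
      let second := PySem.Str.replace (PySem.Str.strip l1) " " ""
      if !(PySem.Str.startswith second "|" && PySem.Str.endswith second "|") then false
      else
        -- the two cursor loops leave the slice s[i:j]; the backward loop runs on the reversed tail
        let core := (pvDropPipes (pvDropPipes second.toList).reverse).reverse
        if core.isEmpty then false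
        else pvScan core false

-- ===== PRECONDITION & SPEC =====
def Spec_looks_like_markdown_table_py (lines : List String) (out : Bool) : Prop := out = looks_like_markdown_table_py_alt lines
instance (lines : List String) (out : Bool) : Decidable (Spec_looks_like_markdown_table_py lines out) := by unfold Spec_looks_like_markdown_table_py; infer_instance

-- ===== CLAIM (what is proved, stated in full; the proofs are below) =====
def Claim_equal_looks_like_markdown_table_py : Prop := ∀ (lines : List String), Dom_looks_like_markdown_table_py lines → Spec_looks_like_markdown_table_py lines (looks_like_markdown_table_py lines)

-- ===== LEMMAS AND PROOFS =====

-- proof-side: structural version of str.split('|')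
def pvSplit : List Char → List (List Char)
  | [] => [[]]
  | c :: r =>
    if c = '|' then [] :: pvSplit r
    else
      match pvSplit r with
      | u :: rest => (c :: u) :: rest
      | [] => [[c]]
def pvDashOK (c : Char) : Bool := c == '-' || c == ':'
def pvCellOK (c : List Char) : Bool := !c.isEmpty && c.all pvDashOK

lemma pvSplit_ne_nil (l : List Char) : pvSplit l ≠ [] := by
  cases l with
  | nil => simp [pvSplit]
  | cons c r =>
    simp only [pvSplit]
    split_ifs
    · simp
    · rcases h : pvSplit r with _ | ⟨u, rest⟩ <;> simp

lemma pvDropPipes_eq (l : List Char) :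
    pvDropPipes l = l.dropWhile (fun c => (['|'] : List Char).contains c) := by
  induction l with
  | nil => rfl
  | cons c r ih =>
    simp only [pvDropPipes, List.dropWhile_cons]
    by_cases h : c = '|' <;> simp [h, ih]

lemma pvCore_eq (l : List Char) :
    (pvDropPipes (pvDropPipes l).reverse).reverse = PySem.Chars.stripChars l ['|'] := by
  simp [PySem.Chars.stripChars, pvDropPipes_eq]

lemma splitOn_go_eq (l : List Char) : ∀ (fuel : Nat) (cur : List Char) (acc : List (List Char)),
    l.length < fuel →
    PySem.Chars.splitOn.go ['|'] fuel l cur acc =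
      acc.reverse ++ (match pvSplit l with
        | u :: rest => (cur.reverse ++ u) :: rest
        | [] => []) := by
  induction l with
  | nil =>
    intro fuel cur acc h
    rcases fuel with _ | f
    · omega
    · simp [PySem.Chars.splitOn.go, pvSplit]
  | cons c r ih =>
    intro fuel cur acc h
    rcases fuel with _ | f
    · omega
    by_cases hc : c = '|'
    · subst hc
      have hpre : (['|'] : List Char).isPrefixOf ('|' :: r) = true := by simp [List.isPrefixOf]
      rw [PySem.Chars.splitOn.go]
      simp only [hpre, if_pos]
      have hdrop : List.drop (['|'] : List Char).length ('|' :: r) = r := rfl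
      rw [hdrop, ih f [] (cur.reverse :: acc) (by simp at h; omega)]
      rcases hs : pvSplit r with _ | ⟨u, rest⟩
      · exact absurd hs (pvSplit_ne_nil r)
      · simp [pvSplit, hs]
    · have hpre : (['|'] : List Char).isPrefixOf (c :: r) = false := by
        simp [List.isPrefixOf]; exact fun hh => (hc hh.symm).elim
      rw [PySem.Chars.splitOn.go]
      simp only [hpre]
      rw [ih f (c :: cur) acc (by simp at h; omega)]
      rcases hs : pvSplit r with _ | ⟨u, rest⟩
      · exact absurd hs (pvSplit_ne_nil r)
      · simp [pvSplit, hc, hs]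

lemma splitOn_eq_pvSplit (l : List Char) :
    PySem.Chars.splitOn l ['|'] = pvSplit l := by
  rw [PySem.Chars.splitOn, splitOn_go_eq l (l.length + 1) [] [] (Nat.lt_succ_self _)]
  rcases hs : pvSplit l with _ | ⟨u, rest⟩
  · exact absurd hs (pvSplit_ne_nil l)
  · simp

lemma cellBad_eq (c : List Char) : pvCellBad c = !pvCellOK c := by
  have hT : PySem.Set.ofList ['-', ':'] = ['-', ':'] := rfl
  have h : (PySem.Set.diff (PySem.Set.ofList c) (PySem.Set.ofList ['-', ':'])).isEmpty
      = c.all pvDashOK := by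
    rw [Bool.eq_iff_iff]
    simp [PySem.Set.diff, hT, List.isEmpty_iff, List.filter_eq_nil_iff,
      PySem.Set.mem_ofList, pvDashOK]
    exact forall₂_congr fun a _ => or_iff_not_imp_left.symm
  unfold pvCellBad pvCellOK
  rw [h]
  cases c.isEmpty <;> cases c.all pvDashOK <;> rfl

lemma scan_eq (l : List Char) : ∀ (seen : Bool), pvScan l seen =
    (match pvSplit l with
      | u :: rest => (seen || !u.isEmpty) && u.all pvDashOK && rest.all pvCellOK
      | [] => true) := by
  induction l with
  | nil => intro seen; cases seen <;> simp [pvScan, pvSplit]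
  | cons c r ih =>
    intro seen
    rcases hs : pvSplit r with _ | ⟨u, rest⟩
    · exact absurd hs (pvSplit_ne_nil r)
    by_cases hc : c = '|'
    · subst hc
      have hI := ih false
      rw [hs] at hI
      simp only [pvScan, pvSplit, hs]
      cases seen <;> simp [hI, pvCellOK, Bool.and_assoc]
    · by_cases hd : (c = '-' ∨ c = ':')
      · have hdb : pvDashOK c = true := by rcases hd with h | h <;> simp [pvDashOK, h]
        have hI := ih true
        rw [hs] at hI
        simp only [pvScan, pvSplit, hs]
        simp [hc, hd, hI, hdb]
      · rw [not_or] at hd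
        have hdb : pvDashOK c = false := by simp [pvDashOK, hd.1, hd.2]
        simp only [pvScan, pvSplit, hs]
        simp [hc, hd.1, hd.2, hdb]

lemma allOK_eq (l : List Char) : (pvSplit l).all pvCellOK = pvScan l false := by
  rw [scan_eq]
  rcases hs : pvSplit l with _ | ⟨u, rest⟩
  · exact absurd hs (pvSplit_ne_nil l)
  · simp [pvCellOK, Bool.and_assoc]

lemma tail_eq (m : List Char) :
    (!decide (PySem.Chars.splitOn (PySem.Chars.stripChars m ['|']) ['|'] = []) &&
      List.foldl (fun ok c => !pvCellBad c && ok) true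
        (PySem.Chars.splitOn (PySem.Chars.stripChars m ['|']) ['|']))
    = (!decide (pvDropPipes (pvDropPipes m).reverse = []) &&
        pvScan (pvDropPipes (pvDropPipes m).reverse).reverse false) := by
  have hcore : (pvDropPipes (pvDropPipes m).reverse).reverse = PySem.Chars.stripChars m ['|'] :=
    pvCore_eq m
  set l := PySem.Chars.stripChars m ['|'] with hl
  have hrev : pvDropPipes (pvDropPipes m).reverse = l.reverse := by
    rw [← hcore]; simp
  rw [hrev, splitOn_eq_pvSplit]
  have h1 : decide (pvSplit l = []) = false := by simp [pvSplit_ne_nil l]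
  have h2 : decide (l.reverse = []) = decide (l = []) := by simp
  rw [h1, h2, List.reverse_reverse]
  have hf : (fun ok (c : List Char) => !pvCellBad c && ok)
      = (fun ok c => if pvCellBad c then false else ok) := by
    funext ok c; cases pvCellBad c <;> cases ok <;> rfl
  rw [hf, PySem.List.foldl_if_false_eq]
  have hany : (pvSplit l).any pvCellBad = !(pvSplit l).all pvCellOK := by
    simp [cellBad_eq, List.any_eq_not_all_not]
  rw [Bool.true_and, hany, Bool.not_not, allOK_eq]
  rcases hl2 : l with _ | ⟨c, r⟩
  · simp [pvScan]
  · simp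

theorem port_eq (lines : List String) :
    looks_like_markdown_table_py lines = looks_like_markdown_table_py_alt lines := by
  match lines with
  | [] => rfl
  | [_] => rfl
  | l0 :: l1 :: rest =>
    simp [looks_like_markdown_table_py, looks_like_markdown_table_py_alt, tail_eq]

-- ===== VERDICT (by name: the statement is the Claim_ definition above) =====
theorem looks_like_markdown_table_py_spec : Claim_equal_looks_like_markdown_table_py := by
  intro lines _
  unfold Spec_looks_like_markdown_table_py
  exact port_eq lines
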